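-- pv_equiv track=rewrite | github.com/robgil-dds/atst | atst/domain/csp/reports.py | _rollup_project_totals
-- ===== SOURCE A (Python) =====
-- from itertools import groupby
--
-- def _rollup_project_totals(data):
--     project_totals = {}
--     for project, environments in data.items():
--         project_spend = [
--             (month, spend)
--             for env in environments.values()
--             if env
--             for month, spend in env.items()
--         ]
--         project_totals[project] = {
--             month: sum([spend[1] for spend in spends])
--             for month, spends in groupby(sorted(project_spend), lambda x: x[0])
--         }
--
--     return project_totals
-- ===== SOURCE B (Python) =====
-- def _rollup_project_totals(data):
--     # Bucket accumulation per month instead of sort-all-pairs + groupby; sums are ints,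
--     # so accumulation order cannot change the totals, and sorting the (distinct) months
--     # reproduces the original's key order.
--     totals = {}
--     for project, environments in data.items():
--         buckets = {}
--         for env in environments.values():
--             for month, spend in env.items():
--                 buckets[month] = buckets.get(month, 0) + spend
--         totals[project] = dict(sorted(buckets.items(), key=lambda kv: kv[0]))
--     return totals
-- ===== Notes on version B (the rewrite author's own statement) =====
-- stated objective: alternative
-- what changed: Replaces sorting the whole (month, spend) pair list and groupby-summing runs with a single-pass dict of per-month running totals, then emits the distinct months sorted; only distinct months are sorted instead of every pair.
import Mathlib
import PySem

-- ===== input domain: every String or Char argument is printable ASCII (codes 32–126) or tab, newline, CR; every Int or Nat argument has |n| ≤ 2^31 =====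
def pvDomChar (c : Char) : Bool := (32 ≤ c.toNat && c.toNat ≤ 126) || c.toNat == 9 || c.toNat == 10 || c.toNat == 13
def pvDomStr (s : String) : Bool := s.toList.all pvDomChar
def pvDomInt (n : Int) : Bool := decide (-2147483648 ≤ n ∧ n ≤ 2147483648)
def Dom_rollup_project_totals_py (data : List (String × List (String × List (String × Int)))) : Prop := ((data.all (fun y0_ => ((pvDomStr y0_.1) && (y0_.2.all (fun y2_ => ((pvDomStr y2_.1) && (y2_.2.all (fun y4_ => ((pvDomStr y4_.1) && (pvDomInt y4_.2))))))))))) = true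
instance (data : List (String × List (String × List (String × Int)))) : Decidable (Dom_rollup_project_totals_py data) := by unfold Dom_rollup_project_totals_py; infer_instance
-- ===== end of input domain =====

-- B replaces sort-all-pairs + groupby with a per-month bucket dict accumulated in one pass,
-- emitting the distinct months in sorted order (alternative decomposition, same results).


-- ===== PORT A =====
-- itertools.groupby over a list, key = first component: contiguous runs of equal months.
def pyGroupby (l : List (String × Int)) : List (String × List (String × Int)) :=
  match l with
  | [] => []
  | p :: t =>
      (p.1, p :: t.takeWhile (fun q => q.1 == p.1)) :: pyGroupby (t.dropWhile (fun q => q.1 == p.1))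
termination_by l.length
decreasing_by
  simp only [List.length_cons]
  exact Nat.lt_succ_of_le (t.length_dropWhile_le _)

def rollup_project_totals_py (data : List (String × List (String × List (String × Int)))) : List (String × List (String × Int)) :=
  (data.foldl
    (fun pt pe =>
      let project_spend : List (String × Int) :=
        pe.2.foldl (fun acc ev => if !ev.2.isEmpty then acc ++ ev.2 else acc) []
      pt.insert pe.1
        (((pyGroupby (PySem.List.sorted2 project_spend (fun p => p.1) (fun p => p.2))).foldl
            (fun d g => d.insert g.1 ((g.2.foldl (fun a sp => a ++ [sp.2]) []).sum))
            PySem.Dict.empty).items))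
    PySem.Dict.empty).items

-- ===== PORT B =====
def rollup_project_totals_py_alt (data : List (String × List (String × List (String × Int)))) : List (String × List (String × Int)) :=
  (data.foldl
    (fun tot pe =>
      let buckets : PySem.Dict String Int :=
        pe.2.foldl
          (fun b ev => ev.2.foldl (fun b ms => b.insert ms.1 (b.getD ms.1 0 + ms.2)) b)
          PySem.Dict.empty
      tot.insert pe.1 (PySem.List.sorted buckets.items (fun kv => kv.1) false))
    PySem.Dict.empty).items

-- ===== PRECONDITION & SPEC =====
def Spec_rollup_project_totals_py (data : List (String × List (String × List (String × Int)))) (out : List (String × List (String × Int))) : Prop := out = rollup_project_totals_py_alt data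
instance (data : List (String × List (String × List (String × Int)))) (out : List (String × List (String × Int))) : Decidable (Spec_rollup_project_totals_py data out) := by unfold Spec_rollup_project_totals_py; infer_instance

-- ===== CLAIM (what is proved, stated in full; the proofs are below) =====
def Claim_equal_rollup_project_totals_py : Prop := ∀ (data : List (String × List (String × List (String × Int)))), Dom_rollup_project_totals_py data → Spec_rollup_project_totals_py data (rollup_project_totals_py data)

-- ===== LEMMAS AND PROOFS =====

-- spend total of month m in a pair list
def sumAt (l : List (String × Int)) (m : String) : Int :=
  ((l.filter (fun p => p.1 == m)).map (fun p => p.2)).sum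

-- the lexicographic comparator sorted2 uses on ((·.1), (·.2))
def pvLt (a b : String × Int) : Bool :=
  decide (a.1 < b.1) || (!decide (b.1 < a.1) && decide (a.2 < b.2))

theorem pvLt_asymm {a b : String × Int} (h : pvLt a b = true) : pvLt b a = false := by
  unfold pvLt at h ⊢
  by_cases h1 : a.1 < b.1
  · simp [h1, lt_asymm h1]
  · simp only [h1, decide_false, Bool.false_or, Bool.and_eq_true, Bool.not_eq_true',
      decide_eq_false_iff_not, decide_eq_true_eq] at h
    simp [h1, h.1, lt_asymm h.2]

theorem pvLt_trans {a b c : String × Int} (h1 : pvLt a b = true) (h2 : pvLt b c = true) :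
    pvLt a c = true := by
  unfold pvLt at h1 h2 ⊢
  simp only [Bool.or_eq_true, Bool.and_eq_true, Bool.not_eq_true', decide_eq_true_eq,
    decide_eq_false_iff_not] at h1 h2 ⊢
  rcases h1 with h1 | ⟨h1a, h1b⟩ <;> rcases h2 with h2 | ⟨h2a, h2b⟩
  · exact Or.inl (h1.trans h2)
  · exact Or.inl (lt_of_lt_of_le h1 (not_lt.mp h2a))
  · exact Or.inl (lt_of_le_of_lt (not_lt.mp h1a) h2)
  · exact Or.inr ⟨not_lt.mpr (le_trans (not_lt.mp h1a) (not_lt.mp h2a)), h1b.trans h2b⟩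

theorem insertBy_pairwise (x : String × Int) (acc : List (String × Int))
    (h : acc.Pairwise (fun a b => pvLt b a = false)) :
    (PySem.List.insertBy pvLt x acc).Pairwise (fun a b => pvLt b a = false) := by
  induction acc with
  | nil => simp [PySem.List.insertBy]
  | cons y ys ih =>
    rcases List.pairwise_cons.mp h with ⟨hy, hys⟩
    by_cases hxy : pvLt x y = true
    · simp only [PySem.List.insertBy, hxy, if_true]
      refine List.pairwise_cons.mpr ⟨?_, h⟩
      intro z hz
      rcases List.mem_cons.mp hz with rfl | hz'
      · exact pvLt_asymm hxy
      · cases hzx : pvLt z x with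
        | false => rfl
        | true => exact absurd (pvLt_trans hzx hxy) (by simp [hy z hz'])
    · simp only [PySem.List.insertBy, hxy]
      refine List.pairwise_cons.mpr ⟨?_, ih hys⟩
      intro z hz
      have : z ∈ x :: ys := (PySem.List.insertBy_perm pvLt x ys).mem_iff.mp hz
      rcases List.mem_cons.mp this with rfl | hz'
      · exact Bool.eq_false_iff.mpr hxy
      · exact hy z hz'

theorem sorted2_pairwise (xs : List (String × Int)) :
    (PySem.List.sorted2 xs (fun p => p.1) (fun p => p.2) false).Pairwise
      (fun a b => pvLt b a = false) := by
  have key : ∀ (acc : List (String × Int)),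
      acc.Pairwise (fun a b => pvLt b a = false) →
      (xs.foldl (fun acc x => PySem.List.insertBy pvLt x acc) acc).Pairwise
        (fun a b => pvLt b a = false) := by
    induction xs with
    | nil => intro acc h; exact h
    | cons x xs ih => intro acc h; exact ih _ (insertBy_pairwise x acc h)
  have hdef : PySem.List.sorted2 xs (fun p => p.1) (fun p => p.2) false
      = xs.foldl (fun acc x => PySem.List.insertBy pvLt x acc) [] := rfl
  rw [hdef]
  exact key [] List.Pairwise.nil

theorem sorted2_months_pairwise (xs : List (String × Int)) :
    ((PySem.List.sorted2 xs (fun p => p.1) (fun p => p.2) false).map (fun p => p.1)).Pairwise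
      (· ≤ ·) := by
  refine List.pairwise_map.mpr ((sorted2_pairwise xs).imp ?_)
  intro a b hab
  unfold pvLt at hab
  simp only [Bool.or_eq_false_iff, decide_eq_false_iff_not] at hab
  exact not_lt.mp hab.1

theorem ofList_sublist {α : Type} [BEq α] [LawfulBEq α] (l : List α) :
    (PySem.Set.ofList l).Sublist l := by
  induction l with
  | nil => exact List.Sublist.refl _
  | cons x xs ih =>
    rw [PySem.Set.ofList_cons]
    exact List.Sublist.cons₂ x (List.Sublist.trans (List.filter_sublist) ih)

-- discard removes nothing when the element is absent
theorem discard_of_not_mem {α : Type} [BEq α] [LawfulBEq α] (s : PySem.Set α) (a : α)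
    (h : a ∉ s) : s.discard a = s := by
  refine List.filter_eq_self.mpr ?_
  intro x hx
  simp only [Bool.not_eq_eq_eq_not, Bool.not_true, beq_eq_false_iff_ne, ne_eq]
  intro hxa
  exact h (hxa ▸ hx)

-- discarding a after ofList of (a-block ++ ys)
theorem discard_ofList_append {α : Type} [BEq α] [LawfulBEq α] (xs ys : List α) (a : α)
    (h : ∀ x ∈ xs, x = a) :
    (PySem.Set.ofList (xs ++ ys)).discard a = (PySem.Set.ofList ys).discard a := by
  induction xs with
  | nil => rfl
  | cons x xs ih =>
    have hx : x = a := h x List.mem_cons_self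
    subst hx
    rw [List.cons_append, PySem.Set.ofList_cons]
    unfold PySem.Set.discard
    rw [List.filter_cons]
    simp only [beq_self_eq_true, Bool.not_true]
    rw [List.filter_filter]
    have := ih (fun y hy => h y (List.mem_cons_of_mem _ hy))
    unfold PySem.Set.discard at this
    simpa using this

theorem dropWhile_head_false {α : Type} (p : α → Bool) (l : List α) (r : α) (rs : List α)
    (h : l.dropWhile p = r :: rs) : p r = false := by
  induction l with
  | nil => cases h
  | cons a l ih =>
    by_cases hp : p a
    · rw [List.dropWhile_cons_of_pos hp] at h; exact ih h
    · rw [List.dropWhile_cons_of_neg hp] at h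
      injection h with h1 h2
      subst h1
      exact Bool.eq_false_iff.mpr hp

theorem pyGroupby_eq (q : List (String × Int))
    (h : (q.map (fun p => p.1)).Pairwise (· ≤ ·)) :
    pyGroupby q =
      (PySem.Set.ofList (q.map (fun p => p.1))).map
        (fun m => (m, q.filter (fun p => p.1 == m))) := by
  induction q using pyGroupby.induct with
  | case1 => simp [pyGroupby]
  | case2 p t ih =>
    simp only [List.map_cons] at h
    rcases List.pairwise_cons.mp h with ⟨hhead, htail⟩
    set run := t.takeWhile (fun q => q.1 == p.1) with hrundef
    set rest := t.dropWhile (fun q => q.1 == p.1) with hrestdef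
    have htrd : run ++ rest = t := List.takeWhile_append_dropWhile
    have hrun : ∀ x ∈ run, x.1 = p.1 := by
      intro x hx
      have := List.mem_takeWhile_imp hx
      simpa using this
    have hrest_sorted : (rest.map (fun p => p.1)).Pairwise (· ≤ ·) :=
      List.Pairwise.sublist (List.Sublist.map _ (List.dropWhile_sublist _)) htail
    have hrest_gt : ∀ x ∈ rest, p.1 < x.1 := by
      rcases hrx : rest with _ | ⟨r, rs⟩
      · intro x hx; cases hx
      · have hdw : t.dropWhile (fun q => q.1 == p.1) = r :: rs := by rw [← hrestdef, hrx]
        have hr1 : (r.1 == p.1) = false := dropWhile_head_false _ t r rs hdw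
        have hrmem : r ∈ rest := by rw [hrx]; exact List.mem_cons_self
        have hrt : r ∈ t := (List.dropWhile_sublist _).mem hrmem
        have hrle : p.1 ≤ r.1 := hhead r.1 (List.mem_map_of_mem hrt)
        have hrlt : p.1 < r.1 :=
          lt_of_le_of_ne hrle (fun e => by simp [← e] at hr1)
        intro x hx
        rcases List.mem_cons.mp hx with rfl | hx'
        · exact hrlt
        · have : (r.1 :: rs.map (fun p => p.1)).Pairwise (· ≤ ·) := by
            rw [← List.map_cons, ← hrx]; exact hrest_sorted
          exact lt_of_lt_of_le hrlt
            ((List.pairwise_cons.mp this).1 x.1 (List.mem_map_of_mem hx'))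
    have hrest_ne : ∀ x ∈ rest, x.1 ≠ p.1 := fun x hx => ne_of_gt (hrest_gt x hx)
    have hdisc : (PySem.Set.ofList (t.map (fun p => p.1))).discard p.1
        = PySem.Set.ofList (rest.map (fun p => p.1)) := by
      rw [← htrd, List.map_append]
      rw [discard_ofList_append _ _ _ (fun m hm => by
        rcases List.mem_map.mp hm with ⟨x, hx, rfl⟩
        exact hrun x hx)]
      refine discard_of_not_mem _ _ ?_
      intro hmem
      rcases List.mem_map.mp ((PySem.Set.mem_ofList _ _).mp hmem) with ⟨x, hx, hx1⟩
      exact hrest_ne x hx hx1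
    have hrunfilter : run.filter (fun q => q.1 == p.1) = run :=
      List.filter_eq_self.mpr (fun x hx => by simp [hrun x hx])
    have hrestfilter : rest.filter (fun q => q.1 == p.1) = [] :=
      List.filter_eq_nil_iff.mpr (fun x hx => by simp [hrest_ne x hx])
    have hfilter_head : (p :: t).filter (fun q => q.1 == p.1) = p :: run := by
      rw [List.filter_cons]
      simp only [beq_self_eq_true, if_true]
      rw [← htrd, List.filter_append, hrunfilter, hrestfilter, List.append_nil]
    rw [pyGroupby]
    rw [List.map_cons, PySem.Set.ofList_cons, hdisc, List.map_cons]
    refine List.cons_eq_cons.mpr ⟨?_, ?_⟩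
    · rw [hfilter_head]
    · rw [ih hrest_sorted]
      refine List.map_congr_left ?_
      intro m hm
      rcases List.mem_map.mp ((PySem.Set.mem_ofList _ _).mp hm) with ⟨x, hx, rfl⟩
      have hne : (p.1 == x.1) = false := by
        simp [Ne.symm (hrest_ne x hx)]
      refine congrArg _ ?_
      have hrunnil : run.filter (fun q => q.1 == x.1) = [] :=
        List.filter_eq_nil_iff.mpr (fun y hy => by
          simp [hrun y hy, Ne.symm (hrest_ne x hx)])
      rw [List.filter_cons, ← htrd, List.filter_append, hrunnil, List.nil_append]
      simp [hne]

theorem bucket_getD (ps : List (String × Int)) (b : PySem.Dict String Int) (m : String) :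
    (ps.foldl (fun b ms => b.insert ms.1 (b.getD ms.1 0 + ms.2)) b).getD m 0
      = b.getD m 0 + sumAt ps m := by
  induction ps generalizing b with
  | nil => simp [sumAt]
  | cons p ps ih =>
    rw [List.foldl_cons, ih]
    unfold sumAt
    rw [List.filter_cons]
    by_cases hm : m = p.1
    · simp [hm]
      ring
    · simp [PySem.Dict.getD_insert, hm, Ne.symm hm]

theorem foldl_flatMap {α β σ : Type} (f : σ → β → σ) (g : α → List β) (l : List α) (init : σ) :
    l.foldl (fun s a => (g a).foldl f s) init = (l.flatMap g).foldl f init := by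
  induction l generalizing init with
  | nil => rfl
  | cons x xs ih => simp [List.flatMap_cons, List.foldl_append, ih]

theorem inner_eq (es : List (String × List (String × Int))) :
    ((pyGroupby (PySem.List.sorted2
        (es.foldl (fun acc ev => if !ev.2.isEmpty then acc ++ ev.2 else acc) [])
        (fun p => p.1) (fun p => p.2))).foldl
        (fun d g => d.insert g.1 ((g.2.foldl (fun a sp => a ++ [sp.2]) []).sum))
        PySem.Dict.empty).items
    = PySem.List.sorted
        (es.foldl
          (fun b ev => ev.2.foldl (fun b ms => b.insert ms.1 (b.getD ms.1 0 + ms.2)) b)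
          PySem.Dict.empty).items
        (fun kv => kv.1) false := by
  have hps : es.foldl (fun acc ev => if !ev.2.isEmpty then acc ++ ev.2 else acc) []
      = es.flatMap (fun ev => ev.2) := by
    rw [PySem.List.foldl_congr_mem' es _ (fun acc ev => acc ++ ev.2) [] (by
      intro ev _ acc
      cases hev : ev.2 with
      | nil => simp [hev]
      | cons a l => simp [hev])]
    simpa using PySem.List.foldl_append_eq_flatMap (fun ev => ev.2) es []
  rw [hps, foldl_flatMap]
  set ps := es.flatMap (fun ev => ev.2) with hpsdef
  set q := PySem.List.sorted2 ps (fun p => p.1) (fun p => p.2) false with hqdef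
  have hqperm : q.Perm ps := PySem.List.sorted2_perm ps _ _ false
  have hqsorted : (q.map (fun p => p.1)).Pairwise (· ≤ ·) := sorted2_months_pairwise ps
  have hsum : ∀ m, sumAt q m = sumAt ps m := by
    intro m
    exact List.Perm.sum_eq (List.Perm.map _ (hqperm.filter _))
  -- A's side: groupby result as a map over the distinct sorted months
  have hA : ((pyGroupby q).foldl
      (fun d g => d.insert g.1 ((g.2.foldl (fun a sp => a ++ [sp.2]) []).sum))
      PySem.Dict.empty).items
      = (PySem.Set.ofList (q.map (fun p => p.1))).map (fun m => (m, sumAt q m)) := by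
    rw [pyGroupby_eq q hqsorted]
    set l := (PySem.Set.ofList (q.map (fun p => p.1))).map
        (fun m => (m, q.filter (fun p => p.1 == m))) with hldef
    have hfresh : ∀ a ∈ l,
        (PySem.Dict.empty : PySem.Dict String Int).contains
          ((fun g : String × List (String × Int) => g.1) a) = false :=
      fun a _ => PySem.Dict.contains_empty _
    have hnodup : (l.map (fun g : String × List (String × Int) => g.1)).Nodup := by
      rw [hldef, List.map_map]
      have he : ((fun g : String × List (String × Int) => g.1) ∘
          (fun m => (m, q.filter (fun p => p.1 == m)))) = fun m => m := rfl
      rw [he, List.map_id']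
      exact PySem.Set.nodup_ofList _
    rw [PySem.Dict.items_foldl_insert_fresh l (fun g => g.1)
      (fun g => ((g.2.foldl (fun a sp => a ++ [sp.2]) []).sum)) PySem.Dict.empty hfresh hnodup]
    have hemp : (PySem.Dict.empty : PySem.Dict String Int).items = ([] : List (String × Int)) := rfl
    rw [hemp, List.nil_append, hldef, List.map_map]
    refine List.map_congr_left ?_
    intro m hm
    have hfold := PySem.List.foldl_append_singleton_eq_map (fun sp : String × Int => sp.2)
      (q.filter (fun p => p.1 == m)) []
    rw [List.nil_append] at hfold
    simp only [Function.comp_apply, hfold]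
    rfl
  -- B's side: bucket dict items as a map over the distinct months
  have hBkeys : (ps.foldl (fun b ms => b.insert ms.1 (b.getD ms.1 0 + ms.2))
      PySem.Dict.empty).keys = PySem.Set.ofList (ps.map (fun p => p.1)) := by
    rw [PySem.Dict.keys_foldl_insert_key ps (fun ms => ms.1)
      (fun b ms => b.getD ms.1 0 + ms.2) PySem.Dict.empty]
    rw [PySem.Dict.keys_empty, PySem.Set.update_nil_left]
  have hB : (ps.foldl (fun b ms => b.insert ms.1 (b.getD ms.1 0 + ms.2))
      PySem.Dict.empty).items
      = (PySem.Set.ofList (ps.map (fun p => p.1))).map (fun m => (m, sumAt ps m)) := by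
    rw [PySem.Dict.items_eq_map_keys _ (by rw [hBkeys]; exact PySem.Set.nodup_ofList _) 0]
    rw [hBkeys]
    refine List.map_congr_left ?_
    intro m hm
    rw [bucket_getD, PySem.Dict.getD_empty, zero_add]
  rw [hA, hB]
  -- the distinct q-months are strictly increasing
  have hMq_lt : (PySem.Set.ofList (q.map (fun p => p.1))).Pairwise (· < ·) := by
    have hle : (PySem.Set.ofList (q.map (fun p => p.1))).Pairwise (· ≤ ·) :=
      List.Pairwise.sublist (ofList_sublist _) hqsorted
    have hne : (PySem.Set.ofList (q.map (fun p => p.1))).Pairwise (· ≠ ·) :=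
      PySem.Set.nodup_ofList _
    exact (hle.and hne).imp (fun hab => lt_of_le_of_ne hab.1 hab.2)
  have hMperm : (PySem.Set.ofList (q.map (fun p => p.1))).Perm
      (PySem.Set.ofList (ps.map (fun p => p.1))) := by
    refine (List.perm_ext_iff_of_nodup (PySem.Set.nodup_ofList _)
      (PySem.Set.nodup_ofList _)).mpr ?_
    intro a
    simp only [PySem.Set.mem_ofList, List.mem_map]
    constructor
    · rintro ⟨x, hx, rfl⟩; exact ⟨x, hqperm.mem_iff.mp hx, rfl⟩
    · rintro ⟨x, hx, rfl⟩; exact ⟨x, hqperm.mem_iff.mpr hx, rfl⟩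
  rw [PySem.List.sorted_eq_of_perm_of_pairwise_lt _
      ((PySem.Set.ofList (q.map (fun p => p.1))).map (fun m => (m, sumAt ps m)))
      (fun kv => kv.1)
      (List.Perm.map _ hMperm)
      (List.pairwise_map.mpr hMq_lt)]
  refine List.map_congr_left ?_
  intro m hm
  rw [hsum m]

-- ===== VERDICT (by name: the statement is the Claim_ definition above) =====
theorem rollup_project_totals_py_spec : Claim_equal_rollup_project_totals_py := by
  intro data _
  unfold Spec_rollup_project_totals_py rollup_project_totals_py rollup_project_totals_py_alt
  refine congrArg PySem.Dict.items ?_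
  refine PySem.List.foldl_congr_mem' _ _ _ _ ?_
  intro pe _ acc
  simp only
  exact congrArg (acc.insert pe.1) (inner_eq pe.2)
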